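-- pv_equiv track=rewrite | github.com/clemto94/revision_python | coding_game/buying_shirts.py | lowest_cost
-- ===== SOURCE A (Python) =====
-- def lowest_cost(blue_costs, green_costs, red_costs):
--     n = len(blue_costs)
--
--     # dp[i][color] = (total_cost, previous_color)
--     dp = [{'b': (blue_costs[0], None),
--            'g': (green_costs[0], None),
--            'r': (red_costs[0], None)}]
--
--     for i in range(1, n):
--         prev = dp[-1]
--         curr = {}
--
--         # Choisir bleu aujourd'hui, donc hier = g ou r
--         cost_b = blue_costs[i] + min(prev['g'][0], prev['r'][0])
--         prev_b = 'g' if prev['g'][0] <= prev['r'][0] else 'r'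
--         curr['b'] = (cost_b, prev_b)
--
--         # Choisir vert aujourd'hui, donc hier = b ou r
--         cost_g = green_costs[i] + min(prev['b'][0], prev['r'][0])
--         prev_g = 'b' if prev['b'][0] <= prev['r'][0] else 'r'
--         curr['g'] = (cost_g, prev_g)
--
--         # Choisir rouge aujourd'hui, donc hier = b ou g
--         cost_r = red_costs[i] + min(prev['b'][0], prev['g'][0])
--         prev_r = 'b' if prev['b'][0] <= prev['g'][0] else 'g'
--         curr['r'] = (cost_r, prev_r)
--
--         dp.append(curr)
--
--     # Dernier jour : prendre la couleur avec le coût minimum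
--     last_day = dp[-1]
--     last_color = min(last_day, key=lambda c: last_day[c][0])
--
--     # Backtrack pour retrouver les choix
--     result = [last_color]
--     for i in range(n - 1, 0, -1):
--         last_color = dp[i][last_color][1]
--         result.append(last_color)
--
--     return result[::-1]  # on inverse car on a backtracké
-- ===== SOURCE B (Python) =====
-- def lowest_cost(blue_costs, green_costs, red_costs):
--     # Forward path-carrying DP: each color keeps (cost, path) where path is a shared
--     # cons-chain (color, tail) in last-color-first order; no back-pointer table and
--     # no backtracking pass over it.
--     dp = {'b': (blue_costs[0], ('b', None)),
--           'g': (green_costs[0], ('g', None)),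
--           'r': (red_costs[0], ('r', None))}
--     for bi, gi, ri in zip(blue_costs[1:], green_costs[1:], red_costs[1:]):
--         b, g, r = dp['b'], dp['g'], dp['r']
--         dp = {'b': (bi + min(g[0], r[0]), ('b', (g if g[0] <= r[0] else r)[1])),
--               'g': (gi + min(b[0], r[0]), ('g', (b if b[0] <= r[0] else r)[1])),
--               'r': (ri + min(b[0], g[0]), ('r', (b if b[0] <= g[0] else g)[1]))}
--     node = min(dp.values(), key=lambda t: t[0])[1]
--     out = []
--     while node is not None:
--         out.append(node[0])
--         node = node[1]
--     return out[::-1]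
-- ===== Notes on version B (the rewrite author's own statement) =====
-- stated objective: alternative
-- what changed: Replaces the two-pass back-pointer DP (build dp table with predecessor pointers, then backtrack from the end and reverse) by a single forward pass that carries the full optimal path per color as a shared cons-chain in the DP state, returning the chosen path directly with no table and no backtracking loop.
import Mathlib
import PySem

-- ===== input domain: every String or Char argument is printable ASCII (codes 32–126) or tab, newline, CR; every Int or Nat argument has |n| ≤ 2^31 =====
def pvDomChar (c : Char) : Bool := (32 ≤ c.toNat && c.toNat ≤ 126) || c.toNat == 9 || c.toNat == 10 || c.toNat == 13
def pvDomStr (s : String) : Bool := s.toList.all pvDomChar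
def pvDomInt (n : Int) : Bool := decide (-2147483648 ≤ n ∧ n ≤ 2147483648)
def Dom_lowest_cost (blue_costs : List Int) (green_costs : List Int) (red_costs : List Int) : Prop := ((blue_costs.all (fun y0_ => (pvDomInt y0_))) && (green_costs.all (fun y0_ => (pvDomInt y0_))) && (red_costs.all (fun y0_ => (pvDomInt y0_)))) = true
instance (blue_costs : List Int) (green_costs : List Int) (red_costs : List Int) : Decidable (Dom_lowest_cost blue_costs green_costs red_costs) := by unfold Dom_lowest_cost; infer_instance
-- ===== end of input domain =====

-- B replaces A's back-pointer DP + backtracking reconstruction by a single forward DP that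
-- carries the full optimal path per color (alternative decomposition, same results).


-- ===== PORT A =====
-- dp cell for one day: dict {'b': (cost, prev), 'g': …, 'r': …} with the fixed keys
-- 'b','g','r' in insertion order, ported as a triple (b-slot, g-slot, r-slot).
abbrev DayA := (Int × Option String) × (Int × Option String) × (Int × Option String)

-- the body of A's forward loop building curr from prev
def stepA (prev : DayA) (bi gi ri : Int) : DayA :=
  ((bi + min prev.2.1.1 prev.2.2.1, some (if prev.2.1.1 ≤ prev.2.2.1 then "g" else "r")),
   (gi + min prev.1.1 prev.2.2.1, some (if prev.1.1 ≤ prev.2.2.1 then "b" else "r")),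
   (ri + min prev.1.1 prev.2.1.1, some (if prev.1.1 ≤ prev.2.1.1 then "b" else "g")))

-- dict lookup d[c] for the fixed-key day dict (c is always one of "b","g","r" in A)
def dayGet (d : DayA) (c : String) : Int × Option String :=
  if c = "b" then d.1 else if c = "g" then d.2.1 else d.2.2

def lowest_cost (blue_costs : List Int) (green_costs : List Int) (red_costs : List Int) : List String :=
  let n : Int := blue_costs.length
  -- blue_costs[0] etc.: IndexError (n = 0) is excluded by Pre_, the default is unreachable there
  let d0 : DayA := ((PySem.List.pyGetD blue_costs 0 0, none),
                    (PySem.List.pyGetD green_costs 0 0, none),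
                    (PySem.List.pyGetD red_costs 0 0, none))
  let dp : List DayA := (PySem.List.pyRange 1 n 1).foldl (fun dp i =>
      let prev := PySem.List.pyGetD dp (-1) d0   -- dp[-1]; dp is never empty
      dp ++ [stepA prev (PySem.List.pyGetD blue_costs i 0)
                        (PySem.List.pyGetD green_costs i 0)
                        (PySem.List.pyGetD red_costs i 0)]) [d0]
  let last_day := PySem.List.pyGetD dp (-1) d0
  -- min(last_day, key=…): first minimal cost over the keys in insertion order 'b','g','r' (exact)
  let last_color := if last_day.1.1 ≤ last_day.2.1.1 ∧ last_day.1.1 ≤ last_day.2.2.1 then "b"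
                    else if last_day.2.1.1 ≤ last_day.2.2.1 then "g" else "r"
  -- backtrack: for i in range(n-1, 0, -1); dp[i][last_color][1] is always a string for i ≥ 1,
  -- so .getD "" is exact on every index the loop reads
  let bt := (PySem.List.pyRange (n-1) 0 (-1)).foldl (fun (st : String × List String) i =>
      let lc := (dayGet (PySem.List.pyGetD dp i d0) st.1).2.getD ""
      (lc, st.2 ++ [lc])) (last_color, [last_color])
  bt.2.reverse   -- result[::-1] (PySem.List.slice?_none_none_neg_one: [::-1] is reverse)

-- ===== PORT B =====
-- forward DP state: dict color -> (cost, full path), fixed keys b,g,r as a triple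
abbrev StB := (Int × List String) × (Int × List String) × (Int × List String)

-- a Python cons-chain ('c', tail) with None = empty is ported as the Lean list c :: tail
def stepB (st : StB) (x : Int × Int × Int) : StB :=
  let b := st.1; let g := st.2.1; let r := st.2.2
  ((x.1 + min g.1 r.1, "b" :: (if g.1 ≤ r.1 then g else r).2),
   (x.2.1 + min b.1 r.1, "g" :: (if b.1 ≤ r.1 then b else r).2),
   (x.2.2 + min b.1 g.1, "r" :: (if b.1 ≤ g.1 then b else g).2))

-- the while-loop flattening the chain: append each head, follow the tail
def unwindB : List String → List String → List String
  | [], acc => acc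
  | c :: rest, acc => unwindB rest (acc ++ [c])

def lowest_cost_alt (blue_costs : List Int) (green_costs : List Int) (red_costs : List Int) : List String :=
  let st0 : StB := ((PySem.List.pyGetD blue_costs 0 0, ["b"]),
                    (PySem.List.pyGetD green_costs 0 0, ["g"]),
                    (PySem.List.pyGetD red_costs 0 0, ["r"]))
  let zs := List.zip (PySem.List.slice blue_costs (some 1) none)
              (List.zip (PySem.List.slice green_costs (some 1) none)
                        (PySem.List.slice red_costs (some 1) none))
  let f := zs.foldl stepB st0
  -- min(dp.values(), key=…): first minimal cost in insertion order b,g,r (exact)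
  let node := (if f.1.1 ≤ f.2.1.1 ∧ f.1.1 ≤ f.2.2.1 then f.1
               else if f.2.1.1 ≤ f.2.2.1 then f.2.1 else f.2.2).2
  (unwindB node []).reverse   -- out[::-1] (PySem.List.slice?_none_none_neg_one: [::-1] is reverse)

-- ===== PRECONDITION & SPEC =====
-- Pre_ holds exactly where A returns: a nonempty blue list and green/red lists at least as
-- long (otherwise blue_costs[0] / green_costs[i] / red_costs[i] raises IndexError).
def Pre_lowest_cost (blue_costs : List Int) (green_costs : List Int) (red_costs : List Int) : Prop :=
  blue_costs ≠ [] ∧ blue_costs.length ≤ green_costs.length ∧ blue_costs.length ≤ red_costs.length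
instance (blue_costs : List Int) (green_costs : List Int) (red_costs : List Int) : Decidable (Pre_lowest_cost blue_costs green_costs red_costs) := by unfold Pre_lowest_cost; infer_instance

def pvWitness_lowest_cost : List Int × List Int × List Int := ([1, 5, 2], [3, 1, 4], [2, 2, 2])

def Spec_lowest_cost (blue_costs : List Int) (green_costs : List Int) (red_costs : List Int) (out : List String) : Prop := out = lowest_cost_alt blue_costs green_costs red_costs
instance (blue_costs : List Int) (green_costs : List Int) (red_costs : List Int) (out : List String) : Decidable (Spec_lowest_cost blue_costs green_costs red_costs out) := by unfold Spec_lowest_cost; infer_instance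

-- ===== CLAIM (what is proved, stated in full; the proofs are below) =====
def Claim_equal_lowest_cost : Prop := ∀ (blue_costs : List Int) (green_costs : List Int) (red_costs : List Int), Dom_lowest_cost blue_costs green_costs red_costs → Pre_lowest_cost blue_costs green_costs red_costs → Spec_lowest_cost blue_costs green_costs red_costs (lowest_cost blue_costs green_costs red_costs)

-- ===== LEMMAS AND PROOFS =====

-- abstract forward scan: the dp table A builds, as a structural scanl
def scanlA (d : DayA) : List (Int × Int × Int) → List DayA
  | [] => [d]
  | x :: xs => d :: scanlA (stepA d x.1 x.2.1 x.2.2) xs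

-- predecessor color read by A's backtrack
def prevOf (d : DayA) (c : String) : String := (dayGet d c).2.getD ""

-- path reconstruction over the reversed dp tail, parametric in the base paths
def traceApp : List DayA → String → (String → List String) → List String
  | [], c, f => f c
  | d :: ds, c, f => traceApp ds (prevOf d c) f ++ [c]

-- A's backtrack loop as structural recursion on the count of steps
def btA (d0 : DayA) (dp : List DayA) : Nat → String → String × List String
  | 0, c => (c, [])
  | k + 1, c =>
    let lc := prevOf (PySem.List.pyGetD dp ((k : Int) + 1) d0) c
    let p := btA d0 dp k lc
    (p.1, lc :: p.2)

def isColor (c : String) : Prop := c = "b" ∨ c = "g" ∨ c = "r"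

theorem unwindB_eq (node acc : List String) : unwindB node acc = acc ++ node := by
  induction node generalizing acc with
  | nil => simp [unwindB]
  | cons c rest ih => simp [unwindB, ih]

theorem unwindB_self (node : List String) : unwindB node [] = node := by
  simp [unwindB_eq]

def goodDay (d : DayA) : Prop :=
  (∃ c, isColor c ∧ d.1.2 = some c) ∧ (∃ c, isColor c ∧ d.2.1.2 = some c) ∧
  (∃ c, isColor c ∧ d.2.2.2 = some c)

def costEq (s : StB) (d : DayA) : Prop :=
  s.1.1 = d.1.1 ∧ s.2.1.1 = d.2.1.1 ∧ s.2.2.1 = d.2.2.1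

def stGet (s : StB) (c : String) : Int × List String :=
  if c = "b" then s.1 else if c = "g" then s.2.1 else s.2.2

theorem scanlA_ne_nil (d : DayA) (zs : List (Int × Int × Int)) : scanlA d zs ≠ [] := by
  cases zs <;> simp [scanlA]

theorem scanlA_length (d : DayA) (zs : List (Int × Int × Int)) :
    (scanlA d zs).length = zs.length + 1 := by
  induction zs generalizing d with
  | nil => simp [scanlA]
  | cons x xs ih => simp [scanlA, ih]

theorem scanlA_append (d : DayA) (zs : List (Int × Int × Int)) (x : Int × Int × Int) :
    scanlA d (zs ++ [x]) =
      scanlA d zs ++ [let l := (scanlA d zs).getLast (scanlA_ne_nil d zs); stepA l x.1 x.2.1 x.2.2] := by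
  induction zs generalizing d with
  | nil => simp [scanlA]
  | cons y ys ih =>
    simp only [List.cons_append, scanlA, ih]
    simp [List.getLast_cons (scanlA_ne_nil _ _)]

theorem goodDay_stepA (d : DayA) (bi gi ri : Int) : goodDay (stepA d bi gi ri) := by
  refine ⟨⟨_, ?_, rfl⟩, ⟨_, ?_, rfl⟩, ⟨_, ?_, rfl⟩⟩ <;>
    unfold isColor <;> split <;> simp

theorem prevOf_isColor {d : DayA} (hd : goodDay d) (c : String) : isColor (prevOf d c) := by
  obtain ⟨⟨cb, hcb, hb⟩, ⟨cg, hcg, hg⟩, ⟨cr, hcr, hr⟩⟩ := hd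
  unfold prevOf dayGet
  split
  · simp [hb, hcb]
  · split
    · simp [hg, hcg]
    · simp [hr, hcr]

theorem scanlA_cons_head (d : DayA) (zs : List (Int × Int × Int)) :
    scanlA d zs = d :: (scanlA d zs).tail := by
  cases zs <;> simp [scanlA]

theorem goodDay_mem_scanlA {d : DayA} (hd : goodDay d) (zs : List (Int × Int × Int)) :
    ∀ e ∈ scanlA d zs, goodDay e := by
  induction zs generalizing d with
  | nil => intro e he; simp [scanlA] at he; simpa [he] using hd
  | cons x xs ih =>
    intro e he
    simp only [scanlA, List.mem_cons] at he
    rcases he with rfl | ht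
    · exact hd
    · exact ih (goodDay_stepA d x.1 x.2.1 x.2.2) e ht

theorem goodDay_mem_scanlA_tail {d : DayA} {zs : List (Int × Int × Int)} :
    ∀ e ∈ (scanlA d zs).tail, goodDay e := by
  cases zs with
  | nil => simp [scanlA]
  | cons x xs =>
    intro e he
    exact goodDay_mem_scanlA (goodDay_stepA d x.1 x.2.1 x.2.2) xs e (by simpa [scanlA] using he)

theorem traceApp_append (ds : List DayA) (d : DayA) (c : String) (f : String → List String) :
    traceApp (ds ++ [d]) c f = traceApp ds c (fun c' => f (prevOf d c') ++ [c']) := by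
  induction ds generalizing c with
  | nil => simp [traceApp]
  | cons e es ih => simp [traceApp, ih]

theorem traceApp_congr (ds : List DayA) (hds : ∀ d ∈ ds, goodDay d) (c : String) (hc : isColor c)
    (f f' : String → List String) (hf : ∀ c', isColor c' → f c' = f' c') :
    traceApp ds c f = traceApp ds c f' := by
  induction ds generalizing c with
  | nil => exact hf c hc
  | cons d es ih =>
    simp only [traceApp]
    rw [ih (fun e he => hds e (List.mem_cons_of_mem _ he))
        (prevOf d c) (prevOf_isColor (hds d (List.mem_cons_self)) c)]

-- B's fold invariant: costs track A's dp cell, paths are the reconstructions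
theorem B_inv (zs : List (Int × Int × Int)) : ∀ (d : DayA) (s : StB), costEq s d →
    costEq (zs.foldl stepB s) ((scanlA d zs).getLast (scanlA_ne_nil d zs)) ∧
    ∀ c, isColor c → (stGet (zs.foldl stepB s) c).2.reverse =
      traceApp (scanlA d zs).tail.reverse c (fun c' => (stGet s c').2.reverse) := by
  induction zs with
  | nil =>
    intro d s h
    refine ⟨by simpa [scanlA] using h, ?_⟩
    intro c hc
    rcases hc with rfl | rfl | rfl <;> simp [scanlA, traceApp, stGet]
  | cons x xs ih =>
    intro d s h
    obtain ⟨h1, h2, h3⟩ := h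
    have hstep : costEq (stepB s x) (stepA d x.1 x.2.1 x.2.2) := by
      refine ⟨?_, ?_, ?_⟩ <;> simp [stepB, stepA, h1, h2, h3]
    obtain ⟨ihc, ihp⟩ := ih (stepA d x.1 x.2.1 x.2.2) (stepB s x) hstep
    constructor
    · simpa [scanlA, List.foldl_cons,
        List.getLast_cons (scanlA_ne_nil (stepA d x.1 x.2.1 x.2.2) xs)] using ihc
    · intro c hc
      have hrev : (scanlA d (x :: xs)).tail.reverse =
          (scanlA (stepA d x.1 x.2.1 x.2.2) xs).tail.reverse ++ [stepA d x.1 x.2.1 x.2.2] := by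
        simp only [scanlA, List.tail_cons]
        conv_lhs => rw [scanlA_cons_head]
        simp
      rw [List.foldl_cons, ihp c hc, hrev, traceApp_append]
      refine traceApp_congr _ (fun e he => goodDay_mem_scanlA_tail e (List.mem_reverse.mp he)) c hc _ _ ?_
      intro c' hc'
      rcases hc' with rfl | rfl | rfl
      · simp only [stGet, stepB, prevOf, dayGet, stepA, h1, h2, h3]
        by_cases hcase : d.2.1.1 ≤ d.2.2.1 <;> simp [hcase]
      · simp only [stGet, stepB, prevOf, dayGet, stepA, h1, h2, h3]
        by_cases hcase : d.1.1 ≤ d.2.2.1 <;> simp [hcase]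
      · simp only [stGet, stepB, prevOf, dayGet, stepA, h1, h2, h3]
        by_cases hcase : d.1.1 ≤ d.2.1.1 <;> simp [hcase]

-- btA is the trace over the segment of dp read so far
theorem btA_eq_trace (d0 : DayA) (dp : List DayA) (hdp : dp ≠ []) :
    ∀ (k : Nat), k + 1 ≤ dp.length → ∀ c,
      traceApp ((dp.take (k + 1)).tail).reverse c (fun c' => [c']) =
        (btA d0 dp k c).2.reverse ++ [c] := by
  intro k
  induction k with
  | zero =>
    intro _ c
    rcases dp with _ | ⟨d, ds⟩
    · exact absurd rfl hdp
    · simp [traceApp, btA]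
  | succ k ih =>
    intro hk c
    have hk1 : k + 1 < dp.length := hk
    have htake : dp.take (k + 2) = dp.take (k + 1) ++ [dp[k + 1]] := by
      rw [List.take_add_one]
      simp [List.getElem?_eq_getElem hk1]
    have htail : (dp.take (k + 2)).tail = (dp.take (k + 1)).tail ++ [dp[k + 1]] := by
      rw [htake]
      rcases dp with _ | ⟨d, ds⟩
      · exact absurd rfl hdp
      · simp [List.take_succ_cons]
    have hget : PySem.List.pyGetD dp ((k : Int) + 1) d0 = dp[k + 1] := by
      have : ((k : Int) + 1) = ((k + 1 : Nat) : Int) := by push_cast; ring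
      rw [this, PySem.List.pyGetD_natCast, List.getD_eq_getElem?_getD,
        List.getElem?_eq_getElem hk1, Option.getD_some]
    simp only [htail, List.reverse_append, List.reverse_cons, List.reverse_nil, List.nil_append,
      List.singleton_append, traceApp, btA]
    rw [ih (by omega) (prevOf dp[k + 1] c)]
    simp [hget]

-- A's backtrack foldl computes btA
theorem foldl_bt (d0 : DayA) (dp : List DayA) :
    ∀ (k : Nat) (c : String) (acc : List String),
      (PySem.List.pyRange (k : Int) 0 (-1)).foldl (fun (st : String × List String) i =>
          let lc := (dayGet (PySem.List.pyGetD dp i d0) st.1).2.getD ""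
          (lc, st.2 ++ [lc])) (c, acc) =
        ((btA d0 dp k c).1, acc ++ (btA d0 dp k c).2) := by
  intro k
  induction k with
  | zero =>
    intro c acc
    rw [PySem.List.pyRange_neg_one_eq_nil (by norm_num)]
    simp [btA]
  | succ k ih =>
    intro c acc
    rw [PySem.List.pyRange_neg_one_cons (by push_cast; omega), List.foldl_cons]
    have hcast : ((k + 1 : Nat) : Int) = (k : Int) + 1 := by push_cast; ring
    have hcast2 : ((k + 1 : Nat) : Int) - 1 = (k : Int) := by push_cast; ring
    simp only [hcast2]
    rw [ih]
    simp only [btA, hcast]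
    simp [prevOf, List.append_assoc]

-- A's dp-building foldl computes scanlA over the zipped tails
theorem foldl_dp (b g r : List Int) (hg : b.length ≤ g.length)
    (hr : b.length ≤ r.length) (d0 : DayA) :
    ∀ (m : Nat), 1 ≤ m → m ≤ b.length →
      (PySem.List.pyRange 1 (m : Int) 1).foldl (fun dp i =>
          let prev := PySem.List.pyGetD dp (-1) d0
          dp ++ [stepA prev (PySem.List.pyGetD b i 0) (PySem.List.pyGetD g i 0)
                            (PySem.List.pyGetD r i 0)]) [d0] =
        scanlA d0 ((List.zip b.tail (List.zip g.tail r.tail)).take (m - 1)) := by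
  intro m
  induction m with
  | zero => omega
  | succ m ih =>
    intro _ hm
    rcases Nat.eq_or_lt_of_le (Nat.one_le_iff_ne_zero.mpr (by omega) : 1 ≤ m + 1) with h1 | h1
    · rw [← h1]
      rw [show ((1 : Nat) : Int) = 1 by norm_num] at *
      rw [PySem.List.pyRange_one_eq_nil (by norm_num)]
      simp [scanlA]
    · have hm1 : 1 ≤ m := by omega
      have hmb : m ≤ b.length := by omega
      have hcast : ((m + 1 : Nat) : Int) = (m : Int) + 1 := by push_cast; ring
      rw [hcast, PySem.List.pyRange_one_succ_right (by omega), List.foldl_append,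
        ih hm1 hmb]
      set zs := List.zip b.tail (List.zip g.tail r.tail) with hzs
      have hzlen : zs.length = b.length - 1 := by
        simp [hzs, List.length_zip]
        omega
      have hmz : m - 1 < zs.length := by omega
      have htake : zs.take m = zs.take (m - 1) ++ [zs[m - 1]] := by
        conv_lhs => rw [show m = (m - 1) + 1 by omega]
        rw [List.take_add_one, List.getElem?_eq_getElem hmz]
        simp
      have hzm : zs[m - 1] = (b[m]'(by omega), g[m]'(by omega), r[m]'(by omega)) := by
        simp only [hzs]
        rw [List.getElem_zip, List.getElem_zip]
        congr 1
        · rw [List.getElem_tail]; congr 1; omega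
        · congr 1
          · rw [List.getElem_tail]; congr 1; omega
          · rw [List.getElem_tail]; congr 1; omega
      have hne : scanlA d0 (zs.take (m - 1)) ≠ [] := scanlA_ne_nil _ _
      simp only [List.foldl_cons, List.foldl_nil]
      rw [show (m + 1 - 1) = m from rfl, htake, scanlA_append]
      congr 1
      rw [PySem.List.pyGetD_neg_one _ _ hne]
      simp only [hzm]
      have hgetb : PySem.List.pyGetD b ((m : Int)) 0 = b[m]'(by omega) := by
        rw [PySem.List.pyGetD_natCast, List.getD_eq_getElem?_getD,
          List.getElem?_eq_getElem (by omega)]; simp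
      have hgetg : PySem.List.pyGetD g ((m : Int)) 0 = g[m]'(by omega) := by
        rw [PySem.List.pyGetD_natCast, List.getD_eq_getElem?_getD,
          List.getElem?_eq_getElem (by omega)]; simp
      have hgetr : PySem.List.pyGetD r ((m : Int)) 0 = r[m]'(by omega) := by
        rw [PySem.List.pyGetD_natCast, List.getD_eq_getElem?_getD,
          List.getElem?_eq_getElem (by omega)]; simp
      rw [hgetb, hgetg, hgetr]

-- ===== VERDICT (by name: the statement is the Claim_ definition above) =====
theorem lowest_cost_spec : Claim_equal_lowest_cost := by
  intro b g r _ hpre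
  obtain ⟨hb, hg, hr⟩ := hpre
  have hn1 : 1 ≤ b.length := List.length_pos_of_ne_nil hb
  simp only [Spec_lowest_cost, lowest_cost, lowest_cost_alt, PySem.List.slice_from_one, unwindB_self]
  set d0 : DayA := ((PySem.List.pyGetD b 0 0, none),
                    (PySem.List.pyGetD g 0 0, none),
                    (PySem.List.pyGetD r 0 0, none)) with hd0
  set st0 : StB := ((PySem.List.pyGetD b 0 0, ["b"]),
                    (PySem.List.pyGetD g 0 0, ["g"]),
                    (PySem.List.pyGetD r 0 0, ["r"])) with hst0
  set zs := List.zip b.tail (List.zip g.tail r.tail) with hzs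
  have hzlen : zs.length = b.length - 1 := by
    simp [hzs, List.length_zip]
    omega
  have hdp := foldl_dp b g r hg hr d0 b.length hn1 le_rfl
  have htake_all : zs.take (b.length - 1) = zs := by
    rw [← hzlen]; exact List.take_length
  rw [← hzs, htake_all] at hdp
  rw [hdp]
  have hne : scanlA d0 zs ≠ [] := scanlA_ne_nil d0 zs
  have hlen : (scanlA d0 zs).length = b.length := by
    rw [scanlA_length, hzlen]; omega
  rw [PySem.List.pyGetD_neg_one _ d0 hne]
  rw [show ((b.length : Int) - 1) = (((b.length - 1 : Nat)) : Int) by omega]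
  rw [foldl_bt d0 (scanlA d0 zs)]
  have hbt := btA_eq_trace d0 (scanlA d0 zs) hne (b.length - 1) (by omega)
  rw [show b.length - 1 + 1 = b.length by omega, List.take_of_length_le hlen.le] at hbt
  obtain ⟨⟨hc1, hc2, hc3⟩, hp⟩ := B_inv zs d0 st0 ⟨rfl, rfl, rfl⟩
  have hgood : ∀ e ∈ (scanlA d0 zs).tail.reverse, goodDay e :=
    fun e he => goodDay_mem_scanlA_tail e (List.mem_reverse.mp he)
  rw [hc1, hc2, hc3]
  simp only [List.singleton_append, List.reverse_cons]
  split_ifs with h1 h2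
  · rw [← hbt "b"]
    have hpb := hp "b" (Or.inl rfl)
    simp [stGet] at hpb
    rw [hpb]
    exact traceApp_congr _ hgood "b" (Or.inl rfl) _ _
      (by rintro c' (rfl | rfl | rfl) <;> simp [hst0])
  · rw [← hbt "g"]
    have hpg := hp "g" (Or.inr (Or.inl rfl))
    simp [stGet] at hpg
    rw [hpg]
    exact traceApp_congr _ hgood "g" (Or.inr (Or.inl rfl)) _ _
      (by rintro c' (rfl | rfl | rfl) <;> simp [hst0])
  · rw [← hbt "r"]
    have hpr := hp "r" (Or.inr (Or.inr rfl))
    simp [stGet] at hpr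
    rw [hpr]
    exact traceApp_congr _ hgood "r" (Or.inr (Or.inr rfl)) _ _
      (by rintro c' (rfl | rfl | rfl) <;> simp [hst0])
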